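-- pv_equiv track=rewrite | github.com/Zubekanov/MATH3411-Solvers | src/ascii.py | get_codeword
-- ===== SOURCE A (Python) =====
-- from typing import List
--
-- def get_codeword(input: List[str]):
--     codeword = list("00000000")
--     words = "".join(input)
--
--     for char in words:
--         word_binary = list(format(ord(char), "08b"))
--         for pos in range(8):
--             if codeword[pos] == word_binary[pos]:
--                 codeword[pos] = "0"
--             else:
--                 codeword[pos] = "1"
--
--     codeword = "".join(codeword)
--     codeword_ascii = chr(int(codeword, 2))
--     return "Codeword is \"" + codeword_ascii + "\", with binary " + codeword + "\n"
-- ===== SOURCE B (Python) =====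
-- from typing import List
--
-- def get_codeword(input: List[str]):
--     acc = 0
--     for char in "".join(input):
--         acc ^= ord(char)
--     binary = format(acc, "08b")
--     return "Codeword is \"" + chr(acc) + "\", with binary " + binary + "\n"
-- ===== Notes on version B (the rewrite author's own statement) =====
-- stated objective: simpler
-- what changed: Replaces A's mutable list of '0'/'1' characters and its inner 8-position comparison loop with a single integer XOR of the character codes; the binary string is formatted once at the end.
import Mathlib
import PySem

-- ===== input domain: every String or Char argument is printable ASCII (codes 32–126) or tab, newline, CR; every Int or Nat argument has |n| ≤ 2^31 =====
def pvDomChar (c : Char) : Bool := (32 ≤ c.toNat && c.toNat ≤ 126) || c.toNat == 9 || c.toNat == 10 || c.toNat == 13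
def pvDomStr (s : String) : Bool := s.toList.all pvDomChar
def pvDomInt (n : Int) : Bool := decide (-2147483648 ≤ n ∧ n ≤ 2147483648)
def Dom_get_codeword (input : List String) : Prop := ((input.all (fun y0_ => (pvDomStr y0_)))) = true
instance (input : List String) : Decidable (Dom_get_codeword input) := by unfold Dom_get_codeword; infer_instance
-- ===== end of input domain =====

-- B replaces A's list-of-bit-chars state and nested 8-position comparison loop by a single
-- integer XOR over the character codes (objective: simpler). Equivalence is proved on Dom (ASCII input).

-- ===== PORT A =====
-- format(n, "08b") as a list of chars; exact for n < 256 (on Dom every code point is ≤ 126)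
def pvFmt8 (n : Nat) : List Char := (List.range 8).map (fun k => if n.testBit (7-k) then '1' else '0')
-- int(s, 2) for a list of binary digit chars
def pvParseBin (l : List Char) : Nat := l.foldl (fun a c => 2*a + (if c == '1' then 1 else 0)) 0

def get_codeword (input : List String) : String :=
  let codeword := "00000000".toList
  let words := (input.map String.toList).flatten      -- "".join(input)
  let codeword := words.foldl (fun cw c =>
      let wb := pvFmt8 c.toNat
      (List.range 8).foldl (fun cw pos =>
        cw.set pos (if cw.getD pos ' ' == wb.getD pos ' ' then '0' else '1')) cw) codeword
  let ascii := Char.ofNat (pvParseBin codeword)       -- chr(int(codeword, 2))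
  String.ofList ("Codeword is \"".toList ++ [ascii] ++ "\", with binary ".toList ++ codeword ++ ['\n'])

-- ===== PORT B =====
def get_codeword_alt (input : List String) : String :=
  let words := (input.map String.toList).flatten      -- "".join(input)
  let acc := words.foldl (fun a c => a ^^^ c.toNat) 0
  let binary := pvFmt8 acc                            -- format(acc, "08b")
  String.ofList ("Codeword is \"".toList ++ [Char.ofNat acc] ++ "\", with binary ".toList ++ binary ++ ['\n'])

-- ===== PRECONDITION & SPEC =====
def Spec_get_codeword (input : List String) (out : String) : Prop := out = get_codeword_alt input
instance (input : List String) (out : String) : Decidable (Spec_get_codeword input out) := by unfold Spec_get_codeword; infer_instance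

-- ===== CLAIM (what is proved, stated in full; the proofs are below) =====
def Claim_equal_get_codeword : Prop := ∀ (input : List String), Dom_get_codeword input → Spec_get_codeword input (get_codeword input)

-- ===== LEMMAS AND PROOFS =====

set_option maxRecDepth 8192 in
theorem parse_fmt8 : ∀ n < 256, pvParseBin (pvFmt8 n) = n := by decide

theorem xor_lt_256 {a b : Nat} (ha : a < 256) (hb : b < 256) : a ^^^ b < 256 :=
  Nat.xor_lt_two_pow (n := 8) ha hb

theorem domChar_lt (c : Char) (h : pvDomChar c = true) : c.toNat < 256 := by
  simp [pvDomChar] at h; omega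

-- A's inner 8-position loop on two 8-bit strings is bitwise XOR
theorem inner_fmt8 (a b : Nat) :
    (List.range 8).foldl (fun cw pos =>
        cw.set pos (if cw.getD pos ' ' == (pvFmt8 b).getD pos ' ' then '0' else '1'))
      (pvFmt8 a) = pvFmt8 (a ^^^ b) := by
  have h : List.range 8 = [0,1,2,3,4,5,6,7] := rfl
  simp [h, pvFmt8, List.foldl, List.getD, Nat.testBit_xor]
  and_intros <;> split_ifs <;> simp_all

-- outer loop invariant: A's codeword list is the 8-bit image of B's accumulator
theorem loop_eq : ∀ (cs : List Char) (acc : Nat), cs.all pvDomChar = true → acc < 256 →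
    cs.foldl (fun cw c =>
        let wb := pvFmt8 c.toNat
        (List.range 8).foldl (fun cw pos =>
          cw.set pos (if cw.getD pos ' ' == wb.getD pos ' ' then '0' else '1')) cw) (pvFmt8 acc)
      = pvFmt8 (cs.foldl (fun a c => a ^^^ c.toNat) acc)
    ∧ cs.foldl (fun a c => a ^^^ c.toNat) acc < 256 := by
  intro cs
  induction cs with
  | nil => intro acc _ hlt; exact ⟨rfl, hlt⟩
  | cons c cs ih =>
    intro acc hall hlt
    simp only [List.all_cons, Bool.and_eq_true] at hall
    have hc : c.toNat < 256 := domChar_lt c hall.1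
    have hstep : acc ^^^ c.toNat < 256 := xor_lt_256 hlt hc
    obtain ⟨h1, h2⟩ := ih (acc ^^^ c.toNat) hall.2 hstep
    have hF : (let wb := pvFmt8 c.toNat
        List.foldl (fun cw pos =>
          cw.set pos (if cw.getD pos ' ' == wb.getD pos ' ' then '0' else '1')) (pvFmt8 acc) (List.range 8))
        = pvFmt8 (acc ^^^ c.toNat) := inner_fmt8 acc c.toNat
    constructor
    · rw [List.foldl_cons, List.foldl_cons, hF]; exact h1
    · rw [List.foldl_cons]; exact h2

-- ===== VERDICT (by name: the statement is the Claim_ definition above) =====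
theorem get_codeword_spec : Claim_equal_get_codeword := by
  intro input hdom
  unfold Spec_get_codeword get_codeword get_codeword_alt
  have hall : ((input.map String.toList).flatten).all pvDomChar = true := by
    unfold Dom_get_codeword at hdom
    simp only [List.all_flatten, List.all_map, List.all_eq_true] at *
    exact fun s hs => hdom s hs
  have h0 : ("00000000".toList) = pvFmt8 0 := rfl
  obtain ⟨heq, hlt⟩ := loop_eq ((input.map String.toList).flatten) 0 hall (by norm_num)
  simp only [h0, heq, parse_fmt8 _ hlt]
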